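-- pv_equiv track=rewrite | github.com/polku/python_stuff | triangular_nb.py | nb_steps
-- ===== SOURCE A (Python) =====
-- def nb_steps(n):
--     s = []
--     i, steps = 0, 0
--
--     while True:
--         if sum(s) == n:
--             return steps
--         if steps % 2 == 0:
--             while sum(s) < n:
--                 i += 1
--                 s.append(i)
--         else:
--             while sum(s) > n:
--                 s.pop(0)
--         steps += 1
-- ===== SOURCE B (Python) =====
-- def nb_steps(n):
--     # The window of consecutive integers A keeps as a list is (a, b], whose sum
--     # is T(b) - T(a) with T the triangular numbers.  Instead of growing/popping
--     # one element at a time, each phase jumps directly to its end state by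
--     # binary-searching the least k with T(k) >= threshold.
--     def tri(k):
--         return k * (k + 1) // 2
--
--     def tri_inv(m):
--         # least k >= 0 with tri(k) >= m
--         if m <= 0:
--             return 0
--         lo, hi = 0, m
--         while lo < hi:
--             mid = (lo + hi) // 2
--             if tri(mid) >= m:
--                 hi = mid
--             else:
--                 lo = mid + 1
--         return lo
--
--     a = b = 0
--     steps = 0
--     while tri(b) - tri(a) != n:
--         if steps % 2 == 0:
--             b = tri_inv(n + tri(a))
--         else:
--             a = tri_inv(tri(b) - n)
--         steps += 1
--     return steps
-- ===== Notes on version B (the rewrite author's own statement) =====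
-- stated objective: faster
-- what changed: B drops A's explicit element list (re-summed and popped one element at a time) entirely: it represents the window by two bounds whose sum is a difference of triangular numbers and completes each grow/shrink phase in one jump by binary-searching the least k with k(k+1)/2 >= threshold.
import Mathlib
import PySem

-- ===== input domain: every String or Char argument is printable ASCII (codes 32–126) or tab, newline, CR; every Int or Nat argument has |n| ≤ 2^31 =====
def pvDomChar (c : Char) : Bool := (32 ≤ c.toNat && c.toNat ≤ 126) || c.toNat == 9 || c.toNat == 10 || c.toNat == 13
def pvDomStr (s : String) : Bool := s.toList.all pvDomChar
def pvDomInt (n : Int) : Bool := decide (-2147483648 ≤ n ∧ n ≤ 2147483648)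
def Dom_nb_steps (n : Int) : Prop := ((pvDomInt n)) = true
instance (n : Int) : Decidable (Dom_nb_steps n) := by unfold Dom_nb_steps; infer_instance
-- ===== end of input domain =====

-- B replaces A's element list by two window bounds and jumps each grow/shrink phase
-- in one step by binary-searching a triangular-number threshold (objective: faster).
-- Fuel arguments (8*|n|+64 outer, per-phase inner) only totalize the while-loops.

-- ===== PORT A =====
-- inner loop: while sum(s) < n: i += 1; s.append(i)
def growA (n : Int) : Nat → Int → List Int → Int × List Int
  | 0, i, s => (i, s)
  | f+1, i, s => if s.sum < n then growA n f (i+1) (s ++ [i+1]) else (i, s)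

-- inner loop: while sum(s) > n: s.pop(0)   (none = IndexError on the empty list)
def shrinkA (n : Int) : Nat → List Int → Option (List Int)
  | 0, s => some s
  | f+1, s =>
    if s.sum > n then
      match s with
      | [] => none
      | _ :: t => shrinkA n f t
    else some s

def loopA (n : Int) (F : Nat) : Nat → Int → List Int → Int → Option Int
  | 0, _, _, _ => none
  | f+1, i, s, steps =>
    if s.sum = n then some steps
    else if steps % 2 = 0 then
      let p := growA n F i s
      loopA n F f p.1 p.2 (steps+1)
    else
      match shrinkA n F s with
      | none => none
      | some s' => loopA n F f i s' (steps+1)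

def nb_steps (n : Int) : Int :=
  (loopA n (8*n.natAbs+64) (8*n.natAbs+64) 0 [] 0).getD 0

-- ===== PORT B =====
-- tri(k) = k * (k + 1) // 2
def pyTri (k : Int) : Int := PySem.Int.floordiv (k * (k + 1)) 2

-- the hand-written binary search in tri_inv: while lo < hi: …
def triSearch (m : Int) : Nat → Int → Int → Int
  | 0, lo, _ => lo
  | f+1, lo, hi =>
    if lo < hi then
      let mid := PySem.Int.floordiv (lo + hi) 2
      if pyTri mid ≥ m then triSearch m f lo mid else triSearch m f (mid+1) hi
    else lo

-- tri_inv(m): least k ≥ 0 with tri(k) ≥ m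
def triInv (m : Int) : Int := if m ≤ 0 then 0 else triSearch m m.natAbs 0 m

-- outer loop: while tri(b) - tri(a) != n: …
def loopB (n : Int) : Nat → Int → Int → Int → Int
  | 0, _, _, _ => 0
  | f+1, a, b, steps =>
    if pyTri b - pyTri a = n then steps
    else if steps % 2 = 0 then loopB n f a (triInv (n + pyTri a)) (steps+1)
    else loopB n f (triInv (pyTri b - n)) b (steps+1)

def nb_steps_alt (n : Int) : Int := loopB n (8*n.natAbs+64) 0 0 0

-- ===== PRECONDITION & SPEC =====
-- A raises IndexError on every n < 0 (s.pop(0) on the empty list in the first shrink phase)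
def Pre_nb_steps (n : Int) : Prop := 0 ≤ n
instance (n : Int) : Decidable (Pre_nb_steps n) := by unfold Pre_nb_steps; infer_instance
def pvWitness_nb_steps : Int := (5)

def Spec_nb_steps (n : Int) (out : Int) : Prop := out = nb_steps_alt n
instance (n : Int) (out : Int) : Decidable (Spec_nb_steps n out) := by unfold Spec_nb_steps; infer_instance

-- ===== CLAIM (what is proved, stated in full; the proofs are below) =====
def Claim_equal_nb_steps : Prop := ∀ (n : Int), Dom_nb_steps n → Pre_nb_steps n → Spec_nb_steps n (nb_steps n)

-- ===== LEMMAS AND PROOFS =====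

theorem tri_two_mul (k : Int) : 2 * pyTri k = k * (k + 1) := by
  obtain ⟨t, ht⟩ := Int.even_mul_succ_self k
  unfold pyTri
  rw [ht]
  have h : PySem.Int.floordiv (t + t) 2 = t :=
    (PySem.Int.floordiv_eq_iff_of_pos (by norm_num)).mpr ⟨by omega, by omega⟩
  rw [h]; omega

theorem tri_mono {a b : Int} (ha : 0 ≤ a) (hab : a ≤ b) : pyTri a ≤ pyTri b := by
  have h1 := tri_two_mul a
  have h2 := tri_two_mul b
  nlinarith

theorem tri_succ (k : Int) : pyTri (k + 1) = pyTri k + (k + 1) := by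
  have h1 := tri_two_mul (k + 1)
  have h2 := tri_two_mul k
  nlinarith

theorem tri_zero : pyTri 0 = 0 := by decide

-- r is the least k ≥ 0 with pyTri k ≥ m
def IsInv (m r : Int) : Prop :=
  0 ≤ r ∧ m ≤ pyTri r ∧ ∀ k : Int, 0 ≤ k → k < r → pyTri k < m

theorem isInv_le {m r c : Int} (h : IsInv m r) (hc : 0 ≤ c) (hm : m ≤ pyTri c) : r ≤ c := by
  by_contra hcon
  exact absurd hm (not_le.mpr (h.2.2 c hc (by omega)))

theorem lt_isInv {m r c : Int} (h : IsInv m r) (_hc : 0 ≤ c) (hm : pyTri c < m) : c < r := by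
  by_contra hcon
  exact absurd (le_trans h.2.1 (tri_mono h.1 (by omega))) (not_le.mpr hm)

theorem triSearch_isInv (m : Int) : ∀ (f : Nat) (lo hi : Int), 0 ≤ lo → lo ≤ hi →
    m ≤ pyTri hi → (∀ k : Int, 0 ≤ k → k < lo → pyTri k < m) →
    (hi - lo).toNat ≤ f → IsInv m (triSearch m f lo hi) := by
  intro f
  induction f with
  | zero =>
    intro lo hi h0 hle hhi hlo hf
    have : lo = hi := by omega
    subst this
    exact ⟨h0, hhi, hlo⟩
  | succ f ih =>
    intro lo hi h0 hle hhi hlo hf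
    by_cases hlt : lo < hi
    · have hdm := PySem.Int.floordiv_mul_add_mod (lo + hi) 2
      have hm0 := PySem.Int.mod_nonneg (lo + hi) (by norm_num : (0:Int) < 2)
      have hm2 := PySem.Int.mod_lt (lo + hi) (by norm_num : (0:Int) < 2)
      set mid := PySem.Int.floordiv (lo + hi) 2 with hmid
      have hmlo : lo ≤ mid := by omega
      have hmhi : mid < hi := by omega
      simp only [triSearch, if_pos hlt]
      by_cases hc : pyTri mid ≥ m
      · rw [if_pos hc]
        exact ih lo mid h0 hmlo hc hlo (by omega)
      · rw [if_neg hc]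
        refine ih (mid+1) hi (by omega) (by omega) hhi ?_ (by omega)
        intro k hk hkm
        exact lt_of_le_of_lt (tri_mono hk (by omega)) (not_le.mp hc)
    · have : lo = hi := by omega
      subst this
      simp only [triSearch, if_neg hlt]
      exact ⟨h0, hhi, hlo⟩

theorem triInv_isInv (m : Int) : IsInv m (triInv m) := by
  unfold triInv
  by_cases h : m ≤ 0
  · rw [if_pos h]
    exact ⟨le_refl 0, by rw [tri_zero]; omega, by intro k hk hk0; omega⟩
  · rw [if_neg h]
    have hmm : m ≤ pyTri m := by
      have := tri_two_mul m
      nlinarith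
    exact triSearch_isInv m m.natAbs 0 m (le_refl 0) (by omega) hmm
      (by intro k hk hk0; omega) (by omega)

-- the window A's list holds: [lo+1, lo+2, …, hi]
def mkI : Int → Nat → List Int
  | _, 0 => []
  | lo, m+1 => (lo + 1) :: mkI (lo + 1) m

def mkL (lo hi : Int) : List Int := mkI lo (hi - lo).toNat

theorem mkL_nil (lo hi : Int) (h : hi ≤ lo) : mkL lo hi = [] := by
  unfold mkL
  have : (hi - lo).toNat = 0 := by omega
  rw [this]
  rfl

theorem mkL_cons (lo hi : Int) (h : lo < hi) :
    mkL lo hi = (lo + 1) :: mkL (lo + 1) hi := by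
  unfold mkL
  have h1 : (hi - lo).toNat = (hi - (lo + 1)).toNat + 1 := by omega
  rw [h1]
  rfl

theorem mkI_snoc : ∀ (m : Nat) (lo : Int), mkI lo (m + 1) = mkI lo m ++ [lo + 1 + (m : Int)] := by
  intro m
  induction m with
  | zero => intro lo; simp [mkI]
  | succ m ih =>
    intro lo
    show (lo + 1) :: mkI (lo + 1) (m + 1) = ((lo + 1) :: mkI (lo + 1) m) ++ _
    rw [ih (lo + 1)]
    simp
    omega

theorem mkL_snoc (lo hi : Int) (h : lo ≤ hi) :
    mkL lo (hi + 1) = mkL lo hi ++ [hi + 1] := by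
  unfold mkL
  have h1 : (hi + 1 - lo).toNat = (hi - lo).toNat + 1 := by omega
  have h2 : ((hi - lo).toNat : Int) = hi - lo := by omega
  rw [h1, mkI_snoc, h2]
  congr 2
  omega

theorem mkI_sum : ∀ (d : Nat) (lo : Int), (mkI lo d).sum = pyTri (lo + (d : Int)) - pyTri lo := by
  intro d
  induction d with
  | zero => intro lo; simp [mkI]
  | succ d ih =>
    intro lo
    show ((lo + 1) :: mkI (lo + 1) d).sum = _
    rw [List.sum_cons, ih (lo + 1)]
    have h1 : lo + 1 + (d : Int) = lo + ((d : Int) + 1) := by ring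
    have h2 := tri_succ lo
    rw [h1]
    push_cast
    omega

theorem mkL_sum (lo hi : Int) (h : lo ≤ hi) : (mkL lo hi).sum = pyTri hi - pyTri lo := by
  unfold mkL
  rw [mkI_sum]
  congr 2
  omega

-- grow phase: growA from hi lands exactly on triInv (n + pyTri lo)
theorem growA_eq (n : Int) : ∀ (f : Nat) (lo hi : Int), 0 ≤ lo → lo ≤ hi →
    hi ≤ triInv (n + pyTri lo) → (triInv (n + pyTri lo) - hi).toNat ≤ f →
    growA n f hi (mkL lo hi) = (triInv (n + pyTri lo), mkL lo (triInv (n + pyTri lo))) := by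
  intro f
  induction f with
  | zero =>
    intro lo hi h0 hle hr hf
    have : triInv (n + pyTri lo) = hi := by omega
    rw [this]
    rfl
  | succ f ih =>
    intro lo hi h0 hle hr hf
    have hinv := triInv_isInv (n + pyTri lo)
    by_cases hc : (mkL lo hi).sum < n
    · have hs := mkL_sum lo hi hle
      have hhi : pyTri hi < n + pyTri lo := by omega
      have hlt : hi < triInv (n + pyTri lo) := lt_isInv hinv (by omega) hhi
      have e1 : growA n (f+1) hi (mkL lo hi) = growA n f (hi+1) (mkL lo (hi+1)) := by
        simp only [growA, if_pos hc, mkL_snoc lo hi hle]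
      rw [e1]
      exact ih lo (hi+1) h0 (by omega) (by omega) (by omega)
    · have hs := mkL_sum lo hi hle
      have hhi : n + pyTri lo ≤ pyTri hi := by omega
      have : triInv (n + pyTri lo) = hi :=
        le_antisymm (isInv_le hinv (by omega) hhi) hr
      rw [this]
      simp only [growA, if_neg hc]

-- shrink phase: shrinkA from lo lands exactly on triInv (pyTri hi - n)
theorem shrinkA_eq (n : Int) (hn : 0 ≤ n) : ∀ (f : Nat) (lo hi : Int), 0 ≤ lo → lo ≤ hi →
    lo ≤ triInv (pyTri hi - n) → (triInv (pyTri hi - n) - lo).toNat ≤ f →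
    shrinkA n f (mkL lo hi) = some (mkL (triInv (pyTri hi - n)) hi) := by
  intro f
  induction f with
  | zero =>
    intro lo hi h0 hle hr hf
    have : triInv (pyTri hi - n) = lo := by omega
    rw [this]
    rfl
  | succ f ih =>
    intro lo hi h0 hle hr hf
    have hinv := triInv_isInv (pyTri hi - n)
    by_cases hc : (mkL lo hi).sum > n
    · have hs := mkL_sum lo hi hle
      have hlo : pyTri lo < pyTri hi - n := by omega
      have hlt : lo < triInv (pyTri hi - n) := lt_isInv hinv h0 hlo
      have hrle : triInv (pyTri hi - n) ≤ hi :=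
        isInv_le hinv (by omega) (by omega)
      have hcons := mkL_cons lo hi (by omega)
      have e1 : shrinkA n (f+1) (mkL lo hi) = shrinkA n f (mkL (lo+1) hi) := by
        rw [hcons]
        simp only [shrinkA]
        rw [if_pos (by rw [← hcons]; exact hc)]
      rw [e1]
      exact ih (lo+1) hi (by omega) (by omega) (by omega) (by omega)
    · have hs := mkL_sum lo hi hle
      have hlo : pyTri hi - n ≤ pyTri lo := by omega
      have : triInv (pyTri hi - n) = lo :=
        le_antisymm (isInv_le hinv h0 hlo) hr
      rw [this]
      simp only [shrinkA, if_neg hc]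

theorem triInv_le_bound (n lo : Int) (hn : 0 ≤ n) (h0 : 0 ≤ lo) :
    triInv (n + pyTri lo) ≤ lo + n + 1 := by
  refine isInv_le (triInv_isInv _) (by omega) ?_
  have h1 := tri_two_mul (lo + n + 1)
  have h2 := tri_two_mul lo
  nlinarith

-- outer loop simulation: A's fueled loop over the list equals B's fueled loop over the bounds
theorem loop_eq (n : Int) (hn : 0 ≤ n) :
    ∀ (f : Nat) (lo hi steps : Int), 0 ≤ lo → lo ≤ hi → hi ≤ lo + n + 1 →
    (steps % 2 = 0 → pyTri hi - pyTri lo ≤ n) →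
    (steps % 2 ≠ 0 → n ≤ pyTri hi - pyTri lo) →
    (loopA n (8*n.natAbs+64) f hi (mkL lo hi) steps).getD 0 = loopB n f lo hi steps := by
  intro f
  induction f with
  | zero => intro lo hi steps _ _ _ _ _; rfl
  | succ f ih =>
    intro lo hi steps h0 hle hbd hpe hpo
    have hs := mkL_sum lo hi hle
    by_cases hq : pyTri hi - pyTri lo = n
    · simp only [loopA, loopB, hs, if_pos hq, Option.getD_some]
    · have hq' : ¬ (mkL lo hi).sum = n := by omega
      simp only [loopA, loopB, hs, if_neg hq]
      by_cases hp : steps % 2 = 0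
      · simp only [if_pos hp]
        set r := triInv (n + pyTri lo) with hrdef
        have hinv := triInv_isInv (n + pyTri lo)
        rw [← hrdef] at hinv
        have hsum_lt : pyTri hi < n + pyTri lo := by
          have := hpe hp; omega
        have hlt : hi < r := lt_isInv hinv (by omega) hsum_lt
        have hrb : r ≤ lo + n + 1 := triInv_le_bound n lo hn h0
        rw [growA_eq n (8*n.natAbs+64) lo hi h0 hle (by omega) (by omega)]
        exact ih lo r (steps+1) h0 (by omega) (by omega)
          (by omega) (by intro _; have := hinv.2.1; omega)
      · simp only [if_neg hp]
        set r := triInv (pyTri hi - n) with hrdef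
        have hinv := triInv_isInv (pyTri hi - n)
        rw [← hrdef] at hinv
        have hsum_gt : pyTri hi - pyTri lo > n := by
          have := hpo hp; omega
        have hlt : lo < r := lt_isInv hinv h0 (by omega)
        have hrle : r ≤ hi := isInv_le hinv (by omega) (by omega)
        rw [shrinkA_eq n hn (8*n.natAbs+64) lo hi h0 hle (by omega) (by omega)]
        exact ih r hi (steps+1) (by omega) hrle (by omega)
          (by intro _; have := hinv.2.1; omega) (by omega)

theorem nb_eq (n : Int) (hn : 0 ≤ n) : nb_steps n = nb_steps_alt n := by
  unfold nb_steps nb_steps_alt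
  have h0 : ([] : List Int) = mkL 0 0 := (mkL_nil 0 0 (le_refl 0)).symm
  rw [h0]
  refine loop_eq n hn _ 0 0 0 (le_refl 0) (le_refl 0) (by omega) ?_ ?_
  · intro _; rw [tri_zero]; omega
  · intro h; omega

-- ===== VERDICT (by name: the statement is the Claim_ definition above) =====
theorem nb_steps_spec : Claim_equal_nb_steps := by
  intro n _ hpre
  unfold Spec_nb_steps
  exact nb_eq n hpre
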